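-- pv_equiv track=rewrite | github.com/NickSto/pyBamParser | lib/pyBamParser/read/__init__.py | _get_indels
-- ===== SOURCE A (Python) =====
-- def _get_indels( blocks, reverse, one_based=True ):
--     #TODO: Include the cigar operation as a field in the block so this can avoid counting "N"s
--     #      as deletions.
--     insertions = []
--     deletions = []
--     last_read_end = None
--     last_ref_end = None
--     if reverse:
--         for read_end, read_start, ref_end, ref_start, offset, direction in reversed(blocks):
--             if last_read_end is not None:
--                 if read_start == last_read_end:
--                     del_len = last_ref_end-ref_start
--                     del_start = last_ref_end-del_len-1
--                     deletions.append( ( del_start, del_len ) )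
--                 else:
--                     ins_start = last_ref_end-1
--                     ins_len = read_start-last_read_end
--                     insertions.append( ( ins_start, ins_len ) )
--             last_read_end = read_end
--             last_ref_end = ref_end
--     else:
--         for read_start, read_end, ref_start, ref_end, offset, direction in blocks:
--             if last_read_end is not None:
--                 if read_start == last_read_end:
--                     del_start = last_ref_end-1
--                     del_len = ref_start-last_ref_end
--                     deletions.append( ( del_start, del_len ) )
--                 else:
--                     ins_start = last_ref_end-1
--                     ins_len = read_start-last_read_end
--                     insertions.append( ( ins_start, ins_len ) )
--             last_read_end = read_end
--             last_ref_end = ref_end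
--     return (insertions, deletions)
-- ===== SOURCE B (Python) =====
-- def _get_indels(blocks, reverse, one_based=True):
--     # Staged decomposition: a recursive pass turns the block list into a
--     # tagged event stream (True = insertion, False = deletion), then the
--     # two result lists are obtained by partitioning the stream.
--     def gaps(bs):
--         if len(bs) < 2:
--             return []
--         a, b = bs[0], bs[1]
--         if reverse:
--             pre, pfe = a[0], a[2]
--             rs, fs = b[1], b[3]
--             if rs == pre:
--                 ev = (False, (fs - 1, pfe - fs))
--             else:
--                 ev = (True, (pfe - 1, rs - pre))
--         else:
--             pre, pfe = a[1], a[3]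
--             rs, fs = b[0], b[2]
--             if rs == pre:
--                 ev = (False, (pfe - 1, fs - pfe))
--             else:
--                 ev = (True, (pfe - 1, rs - pre))
--         return [ev] + gaps(bs[1:])
--     evs = gaps(list(reversed(blocks)) if reverse else blocks)
--     return ([p for t, p in evs if t], [p for t, p in evs if not t])
-- ===== Notes on version B (the rewrite author's own statement) =====
-- stated objective: alternative
-- what changed: B replaces A's single accumulator-carrying loop by a staged pipeline: a recursive pass produces a tagged gap-event stream (insertion/deletion events for each adjacent block pair), and the two output lists are then obtained by partitioning that stream; A's last_read_end/last_ref_end state and None guard disappear.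
import Mathlib
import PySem

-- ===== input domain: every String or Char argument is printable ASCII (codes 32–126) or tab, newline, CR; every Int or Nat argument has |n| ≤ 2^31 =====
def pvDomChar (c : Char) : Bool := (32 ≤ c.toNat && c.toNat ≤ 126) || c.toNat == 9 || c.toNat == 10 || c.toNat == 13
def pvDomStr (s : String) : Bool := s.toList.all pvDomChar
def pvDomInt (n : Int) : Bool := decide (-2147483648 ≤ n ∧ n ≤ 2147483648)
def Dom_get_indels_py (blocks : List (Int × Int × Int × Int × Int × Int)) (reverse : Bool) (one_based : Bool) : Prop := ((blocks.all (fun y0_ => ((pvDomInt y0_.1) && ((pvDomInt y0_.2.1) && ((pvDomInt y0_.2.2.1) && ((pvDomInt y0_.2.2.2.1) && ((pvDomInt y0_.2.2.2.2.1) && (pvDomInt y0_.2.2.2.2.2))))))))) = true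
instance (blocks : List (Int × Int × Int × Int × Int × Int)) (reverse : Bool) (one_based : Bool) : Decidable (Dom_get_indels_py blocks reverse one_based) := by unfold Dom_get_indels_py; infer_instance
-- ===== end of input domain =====

-- B replaces A's accumulator-carrying loop by a staged pipeline: a recursive pass builds a
-- tagged gap-event stream, then the two outputs are obtained by partitioning it (alternative
-- decomposition, same cost).
-- ===== PORT A =====
-- state: (insertions, deletions, last = none | some (last_read_end, last_ref_end))
def pvStateA := (List (Int × Int)) × (List (Int × Int)) × Option (Int × Int)

def pvStepRevA (s : pvStateA) (b : Int × Int × Int × Int × Int × Int) : pvStateA :=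
  match b, s with
  | (read_end, read_start, ref_end, ref_start, _offset, _direction), (ins, dels, last) =>
    let s' : (List (Int × Int)) × (List (Int × Int)) :=
      match last with
      | none => (ins, dels)
      | some (last_read_end, last_ref_end) =>
        if read_start = last_read_end then
          let del_len := last_ref_end - ref_start
          let del_start := last_ref_end - del_len - 1
          (ins, dels ++ [(del_start, del_len)])
        else
          let ins_start := last_ref_end - 1
          let ins_len := read_start - last_read_end
          (ins ++ [(ins_start, ins_len)], dels)
    (s'.1, s'.2, some (read_end, ref_end))

def pvStepFwdA (s : pvStateA) (b : Int × Int × Int × Int × Int × Int) : pvStateA :=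
  match b, s with
  | (read_start, read_end, ref_start, ref_end, _offset, _direction), (ins, dels, last) =>
    let s' : (List (Int × Int)) × (List (Int × Int)) :=
      match last with
      | none => (ins, dels)
      | some (last_read_end, last_ref_end) =>
        if read_start = last_read_end then
          let del_start := last_ref_end - 1
          let del_len := ref_start - last_ref_end
          (ins, dels ++ [(del_start, del_len)])
        else
          let ins_start := last_ref_end - 1
          let ins_len := read_start - last_read_end
          (ins ++ [(ins_start, ins_len)], dels)
    (s'.1, s'.2, some (read_end, ref_end))

def get_indels_py (blocks : List (Int × Int × Int × Int × Int × Int)) (reverse : Bool) (one_based : Bool) : (List (Int × Int)) × (List (Int × Int)) :=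
  let st : pvStateA :=
    if reverse then blocks.reverse.foldl pvStepRevA ([], [], none)
    else blocks.foldl pvStepFwdA ([], [], none)
  (st.1, st.2.1)

-- ===== PORT B =====
-- one tagged event per adjacent pair: true = insertion, false = deletion
def pvEvent (reverse : Bool) (a b : Int × Int × Int × Int × Int × Int) : Bool × (Int × Int) :=
  if reverse then
    let pre := a.1; let pfe := a.2.2.1
    let rs := b.2.1; let fs := b.2.2.2.1
    if rs = pre then (false, (fs - 1, pfe - fs)) else (true, (pfe - 1, rs - pre))
  else
    let pre := a.2.1; let pfe := a.2.2.2.1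
    let rs := b.1; let fs := b.2.2.1
    if rs = pre then (false, (pfe - 1, fs - pfe)) else (true, (pfe - 1, rs - pre))

def pvGaps (reverse : Bool) : List (Int × Int × Int × Int × Int × Int) → List (Bool × (Int × Int))
  | a :: b :: rest => pvEvent reverse a b :: pvGaps reverse (b :: rest)
  | _ => []

def get_indels_py_alt (blocks : List (Int × Int × Int × Int × Int × Int)) (reverse : Bool) (one_based : Bool) : (List (Int × Int)) × (List (Int × Int)) :=
  let evs := pvGaps reverse (if reverse then blocks.reverse else blocks)
  ((evs.filter (·.1)).map (·.2), (evs.filter (fun e => !e.1)).map (·.2))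

-- ===== PRECONDITION & SPEC =====
def Spec_get_indels_py (blocks : List (Int × Int × Int × Int × Int × Int)) (reverse : Bool) (one_based : Bool) (out : (List (Int × Int)) × (List (Int × Int))) : Prop := out = get_indels_py_alt blocks reverse one_based
instance (blocks : List (Int × Int × Int × Int × Int × Int)) (reverse : Bool) (one_based : Bool) (out : (List (Int × Int)) × (List (Int × Int))) : Decidable (Spec_get_indels_py blocks reverse one_based out) := by unfold Spec_get_indels_py; infer_instance

-- ===== CLAIM (what is proved, stated in full; the proofs are below) =====
def Claim_equal_get_indels_py : Prop := ∀ (blocks : List (Int × Int × Int × Int × Int × Int)) (reverse : Bool) (one_based : Bool), Dom_get_indels_py blocks reverse one_based → Spec_get_indels_py blocks reverse one_based (get_indels_py blocks reverse one_based)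

-- ===== LEMMAS AND PROOFS =====

-- A's forward loop with carried last = some (p.read_end, p.ref_end) equals
-- (seed lists) ++ the partition of B's event stream for (p :: L).
theorem pv_loop_fwd (L : List (Int × Int × Int × Int × Int × Int))
    (ins dels : List (Int × Int)) (p : Int × Int × Int × Int × Int × Int) :
    (L.foldl pvStepFwdA (ins, dels, some (p.2.1, p.2.2.2.1))).1
      = ins ++ (((pvGaps false (p :: L)).filter (·.1)).map (·.2)) ∧
    (L.foldl pvStepFwdA (ins, dels, some (p.2.1, p.2.2.2.1))).2.1
      = dels ++ (((pvGaps false (p :: L)).filter (fun e => !e.1)).map (·.2)) := by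
  induction L generalizing ins dels p with
  | nil => simp [pvGaps]
  | cons x rest ih =>
    obtain ⟨rs, re, fs, fe, off, dir⟩ := x
    by_cases h : rs = p.2.1
    · have e1 : pvStepFwdA (ins, dels, some (p.2.1, p.2.2.2.1)) (rs, re, fs, fe, off, dir)
          = (ins, dels ++ [(p.2.2.2.1 - 1, fs - p.2.2.2.1)], some (re, fe)) := by
        simp [pvStepFwdA, h]
      have e2 : pvEvent false p (rs, re, fs, fe, off, dir)
          = (false, (p.2.2.2.1 - 1, fs - p.2.2.2.1)) := by
        simp [pvEvent, h]
      have := ih ins (dels ++ [(p.2.2.2.1 - 1, fs - p.2.2.2.1)]) (rs, re, fs, fe, off, dir)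
      simp only [List.foldl_cons, e1, pvGaps, e2, List.filter_cons] at *
      simpa using this
    · have e1 : pvStepFwdA (ins, dels, some (p.2.1, p.2.2.2.1)) (rs, re, fs, fe, off, dir)
          = (ins ++ [(p.2.2.2.1 - 1, rs - p.2.1)], dels, some (re, fe)) := by
        simp [pvStepFwdA, h]
      have e2 : pvEvent false p (rs, re, fs, fe, off, dir)
          = (true, (p.2.2.2.1 - 1, rs - p.2.1)) := by
        simp [pvEvent, h]
      have := ih (ins ++ [(p.2.2.2.1 - 1, rs - p.2.1)]) dels (rs, re, fs, fe, off, dir)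
      simp only [List.foldl_cons, e1, pvGaps, e2, List.filter_cons] at *
      simpa using this

-- same statement for the reverse branch (last = some (p.read_end, p.ref_end) = (p.1, p.2.2.1))
theorem pv_loop_rev (L : List (Int × Int × Int × Int × Int × Int))
    (ins dels : List (Int × Int)) (p : Int × Int × Int × Int × Int × Int) :
    (L.foldl pvStepRevA (ins, dels, some (p.1, p.2.2.1))).1
      = ins ++ (((pvGaps true (p :: L)).filter (·.1)).map (·.2)) ∧
    (L.foldl pvStepRevA (ins, dels, some (p.1, p.2.2.1))).2.1
      = dels ++ (((pvGaps true (p :: L)).filter (fun e => !e.1)).map (·.2)) := by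
  induction L generalizing ins dels p with
  | nil => simp [pvGaps]
  | cons x rest ih =>
    obtain ⟨re, rs, fe, fs, off, dir⟩ := x
    by_cases h : rs = p.1
    · have e1 : pvStepRevA (ins, dels, some (p.1, p.2.2.1)) (re, rs, fe, fs, off, dir)
          = (ins, dels ++ [(p.2.2.1 - (p.2.2.1 - fs) - 1, p.2.2.1 - fs)], some (re, fe)) := by
        simp [pvStepRevA, h]
      have e2 : pvEvent true p (re, rs, fe, fs, off, dir)
          = (false, (fs - 1, p.2.2.1 - fs)) := by
        simp [pvEvent, h]
      have harith : p.2.2.1 - (p.2.2.1 - fs) - 1 = fs - 1 := by ring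
      have := ih ins (dels ++ [(fs - 1, p.2.2.1 - fs)]) (re, rs, fe, fs, off, dir)
      simp only [List.foldl_cons, e1, harith, pvGaps, e2, List.filter_cons] at *
      simpa using this
    · have e1 : pvStepRevA (ins, dels, some (p.1, p.2.2.1)) (re, rs, fe, fs, off, dir)
          = (ins ++ [(p.2.2.1 - 1, rs - p.1)], dels, some (re, fe)) := by
        simp [pvStepRevA, h]
      have e2 : pvEvent true p (re, rs, fe, fs, off, dir)
          = (true, (p.2.2.1 - 1, rs - p.1)) := by
        simp [pvEvent, h]
      have := ih (ins ++ [(p.2.2.1 - 1, rs - p.1)]) dels (re, rs, fe, fs, off, dir)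
      simp only [List.foldl_cons, e1, pvGaps, e2, List.filter_cons] at *
      simpa using this

-- ===== VERDICT (by name: the statement is the Claim_ definition above) =====
theorem get_indels_py_spec : Claim_equal_get_indels_py := by
  intro blocks reverse one_based _
  unfold Spec_get_indels_py get_indels_py get_indels_py_alt
  cases reverse with
  | true =>
    simp only [if_pos rfl]
    cases hL : blocks.reverse with
    | nil => simp [pvGaps]
    | cons x rest =>
      obtain ⟨re, rs, fe, fs, off, dir⟩ := x
      have e0 : pvStepRevA ([], [], none) (re, rs, fe, fs, off, dir) = ([], [], some (re, fe)) := by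
        simp [pvStepRevA]
      have := pv_loop_rev rest [] [] (re, rs, fe, fs, off, dir)
      simp only [List.foldl_cons, e0] at *
      exact Prod.ext (by simpa using this.1) (by simpa using this.2)
  | false =>
    simp only [Bool.false_eq_true, if_neg (by simp : ¬ (False))]
    cases hL : blocks with
    | nil => simp [pvGaps]
    | cons x rest =>
      obtain ⟨rs, re, fs, fe, off, dir⟩ := x
      have e0 : pvStepFwdA ([], [], none) (rs, re, fs, fe, off, dir) = ([], [], some (re, fe)) := by
        simp [pvStepFwdA]
      have := pv_loop_fwd rest [] [] (rs, re, fs, fe, off, dir)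
      simp only [List.foldl_cons, e0] at *
      exact Prod.ext (by simpa using this.1) (by simpa using this.2)
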